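-- pv_equiv track=rewrite | github.com/prathamtandon/g4gproblems | Arrays/flip_zeros_to_maximize_ones.py | flip_zeros_to_maximize_ones
-- ===== SOURCE A (Python) =====
-- def flip_zeros_to_maximize_ones(ones_and_zeros, m):
--
--     consecutive_1s_to_left = [0] * len(ones_and_zeros)
--     consecutive_1s_to_right = [0] * len(ones_and_zeros)
--     one_count = 0
--     end = len(ones_and_zeros)
--
--     for i in range(end):
--         if ones_and_zeros[i] == 1:
--             one_count += 1
--         else:
--             consecutive_1s_to_left[i] = one_count
--             one_count = 0
--
--     one_count = 0
--     for i in range(end-1, -1, -1):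
--         if ones_and_zeros[i] == 1:
--             one_count += 1
--         else:
--             consecutive_1s_to_right[i] = one_count
--             one_count = 0
--
--     zeros = [i for i in range(end) if ones_and_zeros[i] == 0]
--
--     if len(zeros) <= m:
--         return zeros
--
--     max_length = 0
--     max_index = 0
--
--     for i in range(len(zeros)-m+1):
--         cur_length = 0
--         remaining_flips = m
--
--         idx = i
--         while remaining_flips > 0:
--             cur_length += consecutive_1s_to_left[zeros[idx]]
--             cur_length += consecutive_1s_to_right[zeros[idx]]
--             idx += 1
--             remaining_flips -= 1
--
--         if cur_length > max_length:
--             max_length = cur_length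
--             max_index = i
--
--     return zeros[max_index:max_index+m]
-- ===== SOURCE B (Python) =====
-- def flip_zeros_to_maximize_ones(ones_and_zeros, m):
--     n = len(ones_and_zeros)
--     # positions that break a run of ones, with sentinels on both sides
--     breaks = [-1] + [i for i, v in enumerate(ones_and_zeros) if v != 1] + [n]
--     zeros = []
--     w = []
--     for k in range(1, len(breaks) - 1):
--         b = breaks[k]
--         if ones_and_zeros[b] == 0:
--             zeros.append(b)
--             w.append(breaks[k + 1] - breaks[k - 1] - 2)
--     if len(zeros) <= m:
--         return zeros
--     if m < 0:
--         return []
--     cur = sum(w[:m])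
--     best_sum, best = cur, 0
--     for s in range(1, len(zeros) - m + 1):
--         cur += w[s + m - 1] - w[s - 1]
--         if cur > best_sum:
--             best_sum, best = cur, s
--     return zeros[best:best + m]
-- ===== Notes on version B (the rewrite author's own statement) =====
-- stated objective: alternative
-- what changed: Replaces A's two length-n consecutive-ones arrays and per-window re-summation of m per-zero weights by a single pass over the run-break positions (each zero's weight from its neighbouring breaks) plus a sliding-window running sum with incremental update.
-- intended difference: For m < 0 with more than -m zeros, A returns zeros[0:m] (all zero positions except the last -m) -- an artefact of Python's negative-slice arithmetic in zeros[max_index:max_index+m] -- while B returns [], the intended result of flipping a non-positive number of zeros. — e.g. on flip_zeros_to_maximize_ones([0, 0], -1): A returns [0], B returns []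
import Mathlib
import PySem

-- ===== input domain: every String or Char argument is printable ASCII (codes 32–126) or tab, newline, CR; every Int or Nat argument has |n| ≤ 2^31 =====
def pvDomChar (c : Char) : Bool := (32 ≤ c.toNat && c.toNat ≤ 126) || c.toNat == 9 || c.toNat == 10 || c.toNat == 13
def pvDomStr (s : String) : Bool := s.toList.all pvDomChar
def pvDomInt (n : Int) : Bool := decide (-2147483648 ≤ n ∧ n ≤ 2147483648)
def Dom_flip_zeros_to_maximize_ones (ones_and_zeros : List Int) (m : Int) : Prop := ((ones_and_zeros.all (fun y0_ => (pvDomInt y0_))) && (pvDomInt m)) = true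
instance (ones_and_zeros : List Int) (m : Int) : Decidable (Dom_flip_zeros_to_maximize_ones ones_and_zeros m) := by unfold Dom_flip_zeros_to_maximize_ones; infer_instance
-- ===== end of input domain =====

-- B replaces A's two left/right consecutive-ones count arrays and per-window re-summation by a
-- single pass over the run-break positions (one weight per zero) and a sliding-window running sum;
-- return values agree everywhere except the stated m < 0 corner (see D_ below).

-- ===== PORT A =====
-- first loop of A: walks the list keeping the running count of consecutive 1s and
-- recording it at every non-1 position (built front-to-back instead of mutating a zero array)
def pvLeft (a : List Int) (cnt : Int) : List Int :=
  match a with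
  | [] => []
  | x :: xs => if x = 1 then 0 :: pvLeft xs (cnt + 1) else cnt :: pvLeft xs 0

-- second loop of A: same scan from the right end (structural recursion processes the
-- last element first, exactly like Python's range(end-1,-1,-1)); also returns the final count
def pvRight (a : List Int) : List Int × Int :=
  match a with
  | [] => ([], 0)
  | x :: xs =>
    let p := pvRight xs
    if x = 1 then (0 :: p.1, p.2 + 1) else (p.2 :: p.1, 0)

-- A's inner while loop: remaining_flips counts down from m, i.e. exactly m.toNat iterations;
-- all indices are provably in range and nonnegative, so getD/toNat are exact here
def pvWin (left right : List Int) (zs : List Int) (idx : Nat) : Nat → Int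
  | 0 => 0
  | k + 1 =>
    let z := (zs.getD idx 0).toNat
    left.getD z 0 + right.getD z 0 + pvWin left right zs (idx + 1) k

def flip_zeros_to_maximize_ones (ones_and_zeros : List Int) (m : Int) : List Int :=
  let a := ones_and_zeros
  let left := pvLeft a 0
  let right := (pvRight a).1
  -- zeros = [i for i in range(end) if ones_and_zeros[i] == 0]
  let zeros := (PySem.List.pyRange 0 (a.length : Int) 1).filter (fun i => PySem.List.pyGetD a i 0 == 0)
  if (zeros.length : Int) ≤ m then zeros
  else
    -- for i in range(len(zeros)-m+1): ... (loop variable is always ≥ 0, iterated as a Nat range)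
    let st := (List.range ((zeros.length : Int) - m + 1).toNat).foldl
      (fun (st : Int × Nat) i =>
        let cur := pvWin left right zeros i m.toNat
        if st.1 < cur then (cur, i) else st) (0, 0)
    PySem.List.slice zeros (some (st.2 : Int)) (some ((st.2 : Int) + m))

-- ===== PORT B =====
def flip_zeros_to_maximize_ones_alt (ones_and_zeros : List Int) (m : Int) : List Int :=
  let a := ones_and_zeros
  let n : Int := a.length
  -- breaks = [-1] + [i for i, v in enumerate(a) if v != 1] + [n]
  let breaks : List Int :=
    -1 :: (((PySem.List.enumerate a 0).filter (fun iv => !(iv.2 == 1))).map (fun iv => iv.1) ++ [n])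
  -- for k in range(1, len(breaks)-1): append to zeros / w  (k = j+1, iterated as a Nat range)
  let st0 := (List.range (breaks.length - 2)).foldl
    (fun (st : List Int × List Int) (j : Nat) =>
      let k : Int := (j : Int) + 1
      let b := PySem.List.pyGetD breaks k 0
      if PySem.List.pyGetD a b 0 == 0 then
        (st.1 ++ [b], st.2 ++ [PySem.List.pyGetD breaks (k + 1) 0 - PySem.List.pyGetD breaks (k - 1) 0 - 2])
      else st) ([], [])
  let zeros := st0.1
  let w := st0.2
  if (zeros.length : Int) ≤ m then zeros
  else if m < 0 then []
  else
    let cur0 := (PySem.List.slice w none (some m)).sum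
    let st := (List.range ((zeros.length : Int) - m).toNat).foldl
      (fun (st : Int × Int × Int) (j : Nat) =>
        let s : Int := (j : Int) + 1
        let cur := st.1 + PySem.List.pyGetD w (s + m - 1) 0 - PySem.List.pyGetD w (s - 1) 0
        if st.2.1 < cur then (cur, cur, s) else (cur, st.2.1, st.2.2)) (cur0, cur0, 0)
    PySem.List.slice zeros (some st.2.2) (some (st.2.2 + m))

-- ===== PRECONDITION & SPEC =====
-- For m < 0 with more than -m zeros, A returns zeros[0:m] (all zero positions except the last -m
-- of them) — an artefact of Python's negative-slice arithmetic in `zeros[max_index:max_index+m]` —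
-- while B returns [], the intended result of flipping a non-positive number of zeros.
def D_flip_zeros_to_maximize_ones (ones_and_zeros : List Int) (m : Int) : Prop :=
  m < 0 ∧ -m < (ones_and_zeros.countP (fun v => v == 0) : Int)
instance (ones_and_zeros : List Int) (m : Int) : Decidable (D_flip_zeros_to_maximize_ones ones_and_zeros m) := by unfold D_flip_zeros_to_maximize_ones; infer_instance

def Spec_flip_zeros_to_maximize_ones (ones_and_zeros : List Int) (m : Int) (out : List Int) : Prop := ¬ D_flip_zeros_to_maximize_ones ones_and_zeros m → out = flip_zeros_to_maximize_ones_alt ones_and_zeros m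
instance (ones_and_zeros : List Int) (m : Int) (out : List Int) : Decidable (Spec_flip_zeros_to_maximize_ones ones_and_zeros m out) := by unfold Spec_flip_zeros_to_maximize_ones; infer_instance

def pvDiffWitness_flip_zeros_to_maximize_ones : List Int × Int := ([0, 0], -1)
def pvDiffWitnessOut_flip_zeros_to_maximize_ones : (List Int) × (List Int) := ([0], [])

-- ===== CLAIM (what is proved, stated in full; the proofs are below) =====
def Claim_unchanged_flip_zeros_to_maximize_ones : Prop := ∀ (ones_and_zeros : List Int) (m : Int), Dom_flip_zeros_to_maximize_ones ones_and_zeros m → Spec_flip_zeros_to_maximize_ones ones_and_zeros m (flip_zeros_to_maximize_ones ones_and_zeros m)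
def Claim_changed_flip_zeros_to_maximize_ones : Prop := Dom_flip_zeros_to_maximize_ones (pvDiffWitness_flip_zeros_to_maximize_ones.1) (pvDiffWitness_flip_zeros_to_maximize_ones.2) ∧ D_flip_zeros_to_maximize_ones (pvDiffWitness_flip_zeros_to_maximize_ones.1) (pvDiffWitness_flip_zeros_to_maximize_ones.2) ∧ flip_zeros_to_maximize_ones (pvDiffWitness_flip_zeros_to_maximize_ones.1) (pvDiffWitness_flip_zeros_to_maximize_ones.2) = pvDiffWitnessOut_flip_zeros_to_maximize_ones.1 ∧ flip_zeros_to_maximize_ones_alt (pvDiffWitness_flip_zeros_to_maximize_ones.1) (pvDiffWitness_flip_zeros_to_maximize_ones.2) = pvDiffWitnessOut_flip_zeros_to_maximize_ones.2 ∧ pvDiffWitnessOut_flip_zeros_to_maximize_ones.1 ≠ pvDiffWitnessOut_flip_zeros_to_maximize_ones.2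
def Claim_exact_flip_zeros_to_maximize_ones : Prop := ∀ (ones_and_zeros : List Int) (m : Int), Dom_flip_zeros_to_maximize_ones ones_and_zeros m → D_flip_zeros_to_maximize_ones ones_and_zeros m → flip_zeros_to_maximize_ones ones_and_zeros m ≠ flip_zeros_to_maximize_ones_alt ones_and_zeros m

-- ===== LEMMAS AND PROOFS =====

-- the positions (front to back) at which a run of consecutive 1s is broken (i.e. a[i] ≠ 1)
def pvBks (a : List Int) : List Nat :=
  match a with
  | [] => []
  | x :: xs => if x = 1 then (pvBks xs).map (· + 1) else 0 :: (pvBks xs).map (· + 1)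

-- canonical form of the zero positions, the per-zero weight, and the sentinelled break list
def pvZs (a : List Int) : List Nat := (pvBks a).filter (fun i => a.getD i 0 == 0)
def pvLv (a : List Int) (i : Nat) : Int := (pvLeft a 0).getD i 0 + (pvRight a).1.getD i 0
def pvWl (a : List Int) : List Int := (pvZs a).map (pvLv a)
def pvE (a : List Int) : List Int := -1 :: ((pvBks a).map (fun (i : Nat) => (i : Int)) ++ [(a.length : Int)])

theorem pv_getD_map_add_one (l : List Nat) (j : Nat) (h : j < l.length) :
    (l.map (· + 1)).getD j 0 = l.getD j 0 + 1 := by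
  rw [List.getD_eq_getElem _ _ (by simpa using h), List.getD_eq_getElem _ _ h]; simp

theorem pvLeft_at (xs : List Int) (cnt : Int) (j : Nat) (hj : j < (pvBks xs).length) :
    (pvLeft xs cnt).getD ((pvBks xs).getD j 0) 0
      = ((pvBks xs).getD j 0 : Int) - (if j = 0 then -1 - cnt else ((pvBks xs).getD (j - 1) 0 : Int)) - 1 := by
  induction xs generalizing cnt j with
  | nil => simp [pvBks] at hj
  | cons x xs ih =>
    by_cases hx : x = 1
    · simp only [pvBks, pvLeft, hx, ite_true] at hj ⊢
      have hj' : j < (pvBks xs).length := by simpa using hj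
      rw [pv_getD_map_add_one _ _ hj']
      have : ((pvBks xs).getD j 0 + 1 : Nat) = (pvBks xs).getD j 0 + 1 := rfl
      rw [List.getD_cons_succ]
      rw [ih (cnt + 1) j hj']
      by_cases h0 : j = 0
      · subst h0; simp; push_cast [List.length_cons]; omega
      · have hj1 : j - 1 < (pvBks xs).length := by omega
        rw [if_neg h0, if_neg h0, pv_getD_map_add_one _ _ hj1]
        push_cast [List.length_cons]; omega
    · simp only [pvBks, pvLeft, hx, ite_false] at hj ⊢
      cases j with
      | zero => simp
      | succ t =>
        have ht : t < (pvBks xs).length := by simpa using hj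
        rw [List.getD_cons_succ, pv_getD_map_add_one _ _ ht, List.getD_cons_succ]
        rw [ih 0 t ht]
        cases t with
        | zero => simp
        | succ s =>
          have hs : s < (pvBks xs).length := by omega
          rw [if_neg (by omega), if_neg (by omega)]
          simp only [Nat.add_sub_cancel]
          rw [List.getD_cons_succ, pv_getD_map_add_one _ _ hs]
          push_cast [List.length_cons]; omega

theorem pvRight_cnt (xs : List Int) :
    (pvRight xs).2 = (if (pvBks xs).length = 0 then (xs.length : Int) else ((pvBks xs).getD 0 0 : Int)) := by
  induction xs with
  | nil => simp [pvRight, pvBks]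
  | cons x xs ih =>
    by_cases hx : x = 1
    · simp only [pvRight, pvBks, hx, ite_true]
      rw [ih]
      by_cases h0 : (pvBks xs).length = 0
      · rw [if_pos h0, if_pos (by simpa using h0)]; push_cast [List.length_cons]; omega
      · rw [if_neg h0, if_neg (by simpa using h0), pv_getD_map_add_one _ _ (by omega)]
        push_cast [List.length_cons]; omega
    · simp [pvRight, pvBks, hx]

theorem pvRight_at (xs : List Int) (j : Nat) (hj : j < (pvBks xs).length) :
    (pvRight xs).1.getD ((pvBks xs).getD j 0) 0
      = (if j + 1 = (pvBks xs).length then (xs.length : Int) else ((pvBks xs).getD (j + 1) 0 : Int))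
        - ((pvBks xs).getD j 0 : Int) - 1 := by
  induction xs generalizing j with
  | nil => simp [pvBks] at hj
  | cons x xs ih =>
    by_cases hx : x = 1
    · simp only [pvBks, pvRight, hx, ite_true] at hj ⊢
      have hj' : j < (pvBks xs).length := by simpa using hj
      rw [pv_getD_map_add_one _ _ hj', List.getD_cons_succ, ih j hj']
      by_cases hl : j + 1 = (pvBks xs).length
      · rw [if_pos hl, if_pos (by simpa using hl)]; push_cast [List.length_cons]; omega
      · rw [if_neg hl, if_neg (by simpa using hl), pv_getD_map_add_one _ _ (by omega)]
        push_cast [List.length_cons]; omega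
    · simp only [pvBks, pvRight, hx, ite_false] at hj ⊢
      cases j with
      | zero =>
        simp only [List.getD_cons_zero]
        rw [pvRight_cnt xs]
        by_cases h0 : (pvBks xs).length = 0
        · rw [if_pos h0, if_pos (by simp only [List.length_cons, List.length_map]; omega)]
          simp only [List.length_cons]; push_cast; omega
        · rw [if_neg h0, if_neg (by simp only [List.length_cons, List.length_map]; omega),
              List.getD_cons_succ, pv_getD_map_add_one _ _ (by omega)]
          push_cast; omega
      | succ t =>
        have ht : t < (pvBks xs).length := by
          simp only [List.length_cons, List.length_map] at hj; omega
        rw [List.getD_cons_succ, pv_getD_map_add_one _ _ ht, List.getD_cons_succ, ih t ht]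
        by_cases hl : t + 1 = (pvBks xs).length
        · rw [if_pos hl, if_pos (by simp only [List.length_cons, List.length_map]; omega)]
          simp only [List.length_cons]; push_cast; omega
        · rw [if_neg hl, if_neg (by simp only [List.length_cons, List.length_map]; omega),
              List.getD_cons_succ, pv_getD_map_add_one _ _ (by omega)]
          push_cast; omega

-- sentinel list indexing
theorem pvE_len (a : List Int) : (pvE a).length = (pvBks a).length + 2 := by simp [pvE]

theorem pvE_getD_succ (a : List Int) (j : Nat) (hj : j < (pvBks a).length) :
    (pvE a).getD (j + 1) 0 = ((pvBks a).getD j 0 : Int) := by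
  simp only [pvE, List.getD_cons_succ]
  rw [List.getD_eq_getElem _ _ (by simp; omega), List.getD_eq_getElem _ _ hj,
      List.getElem_append_left (by simpa using hj)]
  rw [List.getElem_map]

theorem pvE_getD_two (a : List Int) (j : Nat) (hj : j < (pvBks a).length) :
    (pvE a).getD (j + 2) 0
      = (if j + 1 = (pvBks a).length then (a.length : Int) else ((pvBks a).getD (j + 1) 0 : Int)) := by
  simp only [pvE, List.getD_cons_succ]
  by_cases hl : j + 1 = (pvBks a).length
  · rw [if_pos hl, List.getD_eq_getElem _ _ (by simp; omega)]
    rw [List.getElem_append_right (by simp; omega)]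
    simp [hl]
  · rw [if_neg hl, List.getD_eq_getElem _ _ (by simp; omega), List.getD_eq_getElem _ _ (by omega),
        List.getElem_append_left (by simp; omega)]
    rw [List.getElem_map]

theorem pvE_getD_pred (a : List Int) (j : Nat) (hj : j < (pvBks a).length) :
    (pvE a).getD j 0 = (if j = 0 then (-1 : Int) else ((pvBks a).getD (j - 1) 0 : Int)) := by
  cases j with
  | zero => simp [pvE]
  | succ t =>
    rw [if_neg (by omega), pvE_getD_succ a t (by omega)]
    simp

-- A's two count arrays evaluated at the j-th break, against the sentinelled break list
theorem pvLv_at_bk (a : List Int) (j : Nat) (hj : j < (pvBks a).length) :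
    pvLv a ((pvBks a).getD j 0) = (pvE a).getD (j + 2) 0 - (pvE a).getD j 0 - 2 := by
  unfold pvLv
  rw [pvLeft_at a 0 j hj, pvRight_at a j hj, pvE_getD_two a j hj, pvE_getD_pred a j hj]
  by_cases h0 : j = 0 <;> by_cases hl : j + 1 = (pvBks a).length <;>
    simp [h0, hl] <;> ring

-- nonnegativity of the count arrays, hence of every window sum
theorem pvLeft_nonneg (xs : List Int) (cnt : Int) (hc : 0 ≤ cnt) : ∀ v ∈ pvLeft xs cnt, 0 ≤ v := by
  induction xs generalizing cnt with
  | nil => simp [pvLeft]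
  | cons x xs ih =>
    intro v hv
    by_cases hx : x = 1 <;> simp only [pvLeft, hx, ite_true, ite_false] at hv <;>
      rcases List.mem_cons.1 hv with rfl | hv
    · rfl
    · exact ih (cnt + 1) (by omega) v hv
    · exact hc
    · exact ih 0 (by omega) v hv

theorem pvRight_nonneg (xs : List Int) : (0 ≤ (pvRight xs).2) ∧ (∀ v ∈ (pvRight xs).1, 0 ≤ v) := by
  induction xs with
  | nil => simp [pvRight]
  | cons x xs ih =>
    by_cases hx : x = 1 <;> simp only [pvRight, hx, ite_true, ite_false]
    · exact ⟨by omega, by intro v hv; rcases List.mem_cons.1 hv with rfl | hv; rfl; exact ih.2 v hv⟩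
    · exact ⟨le_refl 0, by intro v hv; rcases List.mem_cons.1 hv with rfl | hv; exact ih.1; exact ih.2 v hv⟩

theorem pv_getD_nonneg (l : List Int) (h : ∀ v ∈ l, 0 ≤ v) (i : Nat) : 0 ≤ l.getD i 0 := by
  by_cases hi : i < l.length
  · rw [List.getD_eq_getElem _ _ hi]; exact h _ (List.getElem_mem hi)
  · rw [List.getD_eq_default _ _ (by omega)]

theorem pvLv_nonneg (a : List Int) (i : Nat) : 0 ≤ pvLv a i := by
  have h1 := pv_getD_nonneg _ (pvLeft_nonneg a 0 le_rfl) i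
  have h2 := pv_getD_nonneg _ (pvRight_nonneg a).2 i
  unfold pvLv; omega

theorem pvWl_nonneg (a : List Int) : ∀ v ∈ pvWl a, 0 ≤ v := by
  intro v hv
  obtain ⟨i, _, rfl⟩ := List.mem_map.1 hv
  exact pvLv_nonneg a i

-- bridges from the ports' comprehensions to pvBks / pvZs
theorem pv_filter_range_cons (x : Int) (xs : List Int) (f : Int → Bool) :
    (List.range (xs.length + 1)).filter (fun i => f ((x :: xs).getD i 0))
      = (if f x then [0] else []) ++ ((List.range xs.length).filter (fun i => f (xs.getD i 0))).map (· + 1) := by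
  rw [List.range_succ_eq_map, List.filter_cons, List.filter_map]
  have : ((fun i => f ((x :: xs).getD i 0)) ∘ Nat.succ) = (fun i => f (xs.getD i 0)) := by
    funext i; simp
  rw [this]
  by_cases hf : f x <;> simp [hf] <;> rfl

theorem pvBks_eq_range (a : List Int) :
    pvBks a = (List.range a.length).filter (fun i => !(a.getD i 0 == 1)) := by
  induction a with
  | nil => simp [pvBks]
  | cons x xs ih =>
    have := pv_filter_range_cons x xs (fun v => !(v == 1))
    simp only [List.length_cons]
    rw [this, ← ih]
    by_cases hx : x = 1 <;> simp [pvBks, hx]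

theorem pvZs_eq_range (a : List Int) :
    pvZs a = (List.range a.length).filter (fun i => a.getD i 0 == 0) := by
  unfold pvZs
  rw [pvBks_eq_range, List.filter_filter]
  apply List.filter_congr
  intro i _
  generalize a.getD i 0 = v
  by_cases h : v = 0 <;> simp [h] <;> try omega

theorem pvZs_len (a : List Int) : (pvZs a).length = a.countP (fun v => v == 0) := by
  rw [pvZs_eq_range]
  induction a with
  | nil => simp
  | cons x xs ih =>
    simp only [List.length_cons]
    rw [pv_filter_range_cons x xs (fun v => v == 0), List.countP_cons, List.length_append,
        List.length_map, ih]
    by_cases hx : x = 0 <;> simp [hx] <;> try omega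

-- A's zeros list is pvZs, cast to Int
theorem pvZA_eq (a : List Int) :
    (PySem.List.pyRange 0 (a.length : Int) 1).filter (fun i => PySem.List.pyGetD a i 0 == 0)
      = (pvZs a).map (fun (i : Nat) => (i : Int)) := by
  have hr : PySem.List.pyRange 0 ((a.length : Nat) : Int) 1 = (List.range a.length).map (fun (k : Nat) => (k : Int)) := by
    rw [PySem.List.pyRange_one]; simp; try exact List.map_eq_flatMap
  rw [hr, List.filter_map, pvZs_eq_range]
  refine congrArg _ (List.filter_congr ?_)
  intro i _
  simp

-- B's break list is the sentinelled pvE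
theorem pv_enum_filter (xs : List Int) (s : Int) :
    ((PySem.List.enumerate xs s).filter (fun iv => !(iv.2 == 1))).map (fun iv => iv.1)
      = (pvBks xs).map (fun (i : Nat) => s + (i : Int)) := by
  induction xs generalizing s with
  | nil => simp [pvBks, PySem.List.enumerate_nil]
  | cons x xs ih =>
    rw [PySem.List.enumerate_cons, List.filter_cons]
    by_cases hx : x = 1
    · rw [if_neg (by simp [hx]), ih (s + 1)]
      simp only [pvBks, hx, ite_true, List.map_map]
      apply List.map_congr_left
      intro i _
      simp only [Function.comp_apply]
      push_cast; ring
    · rw [if_pos (by simp [hx]), List.map_cons, ih (s + 1)]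
      simp only [pvBks, hx, ite_false, List.map_cons, List.map_map]
      congr 1
      · simp
      · apply List.map_congr_left
        intro i _
        simp only [Function.comp_apply]
        push_cast; ring

theorem pvBreaks_eq (a : List Int) :
    (-1 : Int) :: (((PySem.List.enumerate a 0).filter (fun iv => !(iv.2 == 1))).map (fun iv => iv.1)
        ++ [(a.length : Int)]) = pvE a := by
  rw [pv_enum_filter a 0]
  unfold pvE
  congr 1
  congr 1
  apply List.map_congr_left
  intro i _
  ring

-- generic pair-building fold = two filtered maps
theorem pv_foldl_pair (l : List Nat) (c : Nat → Bool) (f g : Nat → Int) (as bs : List Int) :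
    l.foldl (fun (st : List Int × List Int) j =>
        if c j then (st.1 ++ [f j], st.2 ++ [g j]) else st) (as, bs)
      = (as ++ (l.filter c).map f, bs ++ (l.filter c).map g) := by
  induction l generalizing as bs with
  | nil => simp
  | cons x l ih =>
    by_cases hx : c x <;> simp only [List.foldl_cons, List.filter_cons, hx, ite_true, ite_false, if_pos, if_neg]
    · rw [ih]; simp
    · rw [ih]; simp [hx]

-- indices through a list: filtered index range mapped through getD = plain filter/map
theorem pv_index_filter_map (l : List Nat) (p : Nat → Bool) (h : Nat → Int) :
    ((List.range l.length).filter (fun j => p (l.getD j 0))).map (fun j => h (l.getD j 0))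
      = (l.filter p).map h := by
  induction l with
  | nil => simp
  | cons y ys ih =>
    simp only [List.length_cons]
    rw [List.range_succ_eq_map, List.filter_cons, List.filter_map]
    have hc : ((fun j => p ((y :: ys).getD j 0)) ∘ Nat.succ) = fun j => p (ys.getD j 0) := by
      funext j; simp
    have hm : ((fun j => h ((y :: ys).getD j 0)) ∘ Nat.succ) = fun j => h (ys.getD j 0) := by
      funext j; simp
    rw [hc]
    by_cases hy : p y
    · rw [if_pos (by simpa using hy), List.map_cons, List.map_map, hm, ih, List.filter_cons,
          if_pos (by simpa using hy), List.map_cons]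
      simp
    · rw [if_neg (by simpa using hy), List.map_map, hm, ih, List.filter_cons,
          if_neg (by simpa using hy)]

theorem pvWl_len (a : List Int) : (pvWl a).length = (pvZs a).length := by simp [pvWl]

-- A's inner while loop sums a contiguous slice of the weight list
theorem pvWin_eq (a : List Int) (m' : Nat) : ∀ (idx : Nat), idx + m' ≤ (pvZs a).length →
    pvWin (pvLeft a 0) (pvRight a).1 ((pvZs a).map (fun (i : Nat) => (i : Int))) idx m'
      = (((pvWl a).drop idx).take m').sum := by
  induction m' with
  | zero => intro idx h; simp [pvWin]
  | succ k ih =>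
    intro idx h
    have hidx : idx < (pvZs a).length := by omega
    have hz : (((pvZs a).map (fun (i : Nat) => (i : Int))).getD idx 0) = ((pvZs a).getD idx 0 : Int) := by
      rw [List.getD_eq_getElem _ _ (by simpa using hidx), List.getD_eq_getElem _ _ hidx,
          List.getElem_map]
    have hd : (pvWl a).drop idx = pvLv a ((pvZs a).getD idx 0) :: (pvWl a).drop (idx + 1) := by
      have hw : idx < (pvWl a).length := by rw [pvWl_len]; omega
      rw [List.drop_eq_getElem_cons hw]
      congr 1
      unfold pvWl
      rw [List.getElem_map, List.getD_eq_getElem _ _ hidx]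
    rw [pvWin, hz, hd, List.take_succ_cons, List.sum_cons, ih (idx + 1) (by omega)]
    simp only [Int.toNat_natCast]
    unfold pvLv
    ring

-- sliding-window update: the next window sum from the previous one
theorem pv_telescope (W : List Int) (j m' : Nat) (h : j + 1 + m' ≤ W.length) :
    ((W.drop (j + 1)).take m').sum = ((W.drop j).take m').sum + W.getD (j + m') 0 - W.getD j 0 := by
  cases m' with
  | zero => simp
  | succ t =>
    have hj : j < W.length := by omega
    have hjt : j + 1 + t < W.length := by omega
    rw [List.drop_eq_getElem_cons hj, List.take_succ_cons, List.sum_cons, List.take_succ]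
    have h1 : (W.drop (j + 1))[t]? = some (W[j + 1 + t]'hjt) := by
      rw [List.getElem?_drop]
      exact List.getElem?_eq_getElem hjt
    rw [h1]
    have h2 : W[j + 1 + t]'hjt = W.getD (j + (t + 1)) 0 := by
      rw [List.getD_eq_getElem _ _ (by omega)]
      congr 1
      omega
    rw [List.getD_eq_getElem _ _ hj] at *
    simp only [List.sum_append, List.sum_cons, List.sum_nil, Option.toList_some]
    omega

-- the two argmax loops run in lockstep
theorem pv_loop (W : List Int) (m' : Nat) (t : Nat) :
    t + m' ≤ W.length →
    ((List.range t).foldl (fun (st : Int × Int × Int) j =>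
        let cur := st.1 + W.getD (j + m') 0 - W.getD j 0
        if st.2.1 < cur then (cur, cur, (j : Int) + 1) else (cur, st.2.1, st.2.2))
      ((W.take m').sum, (W.take m').sum, 0))
    = (((W.drop t).take m').sum,
       ((List.range t).foldl (fun (st : Int × Nat) j =>
          if st.1 < ((W.drop (j + 1)).take m').sum then (((W.drop (j + 1)).take m').sum, j + 1) else st)
        ((W.take m').sum, 0)).1,
       (((List.range t).foldl (fun (st : Int × Nat) j =>
          if st.1 < ((W.drop (j + 1)).take m').sum then (((W.drop (j + 1)).take m').sum, j + 1) else st)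
        ((W.take m').sum, 0)).2 : Int)) := by
  induction t with
  | zero => intro _; simp
  | succ t ih =>
    intro ht
    rw [List.range_succ, List.foldl_append, List.foldl_append, ih (by omega)]
    simp only [List.foldl_cons, List.foldl_nil]
    rw [← pv_telescope W t m' (by omega)]
    set p := (List.range t).foldl (fun (st : Int × Nat) j =>
          if st.1 < ((W.drop (j + 1)).take m').sum then (((W.drop (j + 1)).take m').sum, j + 1) else st)
        ((W.take m').sum, 0) with hp
    by_cases hlt : p.1 < ((W.drop (t + 1)).take m').sum
    · rw [if_pos hlt, if_pos hlt]
      simp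
    · rw [if_neg hlt, if_neg hlt]

-- with zero flips left, A's argmax loop never moves
theorem pv_stay (l r zs : List Int) (L : List Nat) :
    L.foldl (fun (st : Int × Nat) i =>
      let cur := pvWin l r zs i 0
      if st.1 < cur then (cur, i) else st) ((0 : Int), (0 : Nat)) = (0, 0) := by
  induction L with
  | nil => rfl
  | cons x L ih => simpa [pvWin] using ih

-- B's zeros/w-building loop produces exactly A's zeros and the weight list
theorem pv_st0 (a : List Int) :
    (List.range ((pvE a).length - 2)).foldl
      (fun (st : List Int × List Int) (j : Nat) =>
        let k : Int := (j : Int) + 1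
        let b := PySem.List.pyGetD (pvE a) k 0
        if PySem.List.pyGetD a b 0 == 0 then
          (st.1 ++ [b], st.2 ++ [PySem.List.pyGetD (pvE a) (k + 1) 0 - PySem.List.pyGetD (pvE a) (k - 1) 0 - 2])
        else st) ([], [])
    = ((pvZs a).map (fun (i : Nat) => (i : Int)), pvWl a) := by
  have hK : (pvE a).length - 2 = (pvBks a).length := by rw [pvE_len]; omega
  rw [hK]
  refine Eq.trans (PySem.List.foldl_congr_mem _ _ (fun (st : List Int × List Int) j =>
      if (a.getD ((pvBks a).getD j 0) 0 == 0) then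
        (st.1 ++ [((pvBks a).getD j 0 : Int)],
         st.2 ++ [(pvE a).getD (j + 2) 0 - (pvE a).getD j 0 - 2])
      else st) _ ?_) ?_
  case refine_1 =>
    intro st j hjm
    have hj : j < (pvBks a).length := List.mem_range.1 hjm
    have h1 : PySem.List.pyGetD (pvE a) ((j : Int) + 1) 0 = ((pvBks a).getD j 0 : Int) := by
      have e : ((j : Int) + 1) = ((j + 1 : Nat) : Int) := by push_cast; ring
      rw [e, PySem.List.pyGetD_natCast, pvE_getD_succ a j hj]
    have h2 : PySem.List.pyGetD (pvE a) ((j : Int) + 1 + 1) 0 = (pvE a).getD (j + 2) 0 := by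
      have e : ((j : Int) + 1 + 1) = ((j + 2 : Nat) : Int) := by push_cast; ring
      rw [e, PySem.List.pyGetD_natCast]
    have h3 : PySem.List.pyGetD (pvE a) ((j : Int) + 1 - 1) 0 = (pvE a).getD j 0 := by
      have e : ((j : Int) + 1 - 1) = ((j : Nat) : Int) := by push_cast; ring
      rw [e, PySem.List.pyGetD_natCast]
    simp only [h1, h2, h3, PySem.List.pyGetD_natCast, Int.toNat_natCast]
  case refine_2 =>
    rw [pv_foldl_pair]
    simp only [Prod.mk.injEq, List.nil_append]
    constructor
    · simpa using pv_index_filter_map (pvBks a) (fun i => a.getD i 0 == 0) (fun i => (i : Int))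
    · have hcong : ((List.range (pvBks a).length).filter
          (fun j => a.getD ((pvBks a).getD j 0) 0 == 0)).map
            (fun j => (pvE a).getD (j + 2) 0 - (pvE a).getD j 0 - 2)
          = ((List.range (pvBks a).length).filter
          (fun j => a.getD ((pvBks a).getD j 0) 0 == 0)).map
            (fun j => pvLv a ((pvBks a).getD j 0)) := by
        apply List.map_congr_left
        intro j hjm
        have hj : j < (pvBks a).length := List.mem_range.1 (List.mem_of_mem_filter hjm)
        rw [pvLv_at_bk a j hj]
      rw [hcong, pv_index_filter_map (pvBks a) (fun i => a.getD i 0 == 0) (pvLv a)]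
      rfl

-- the common reference form both ports reduce to
def pvRef (a : List Int) (m : Int) : List Int :=
  let zs := (pvZs a).map (fun (i : Nat) => (i : Int))
  if ((pvZs a).length : Int) ≤ m then zs
  else if m < 0 then []
  else
    let W := pvWl a
    let st := (List.range ((pvZs a).length - m.toNat)).foldl
      (fun (st : Int × Nat) j =>
        if st.1 < ((W.drop (j + 1)).take m.toNat).sum then (((W.drop (j + 1)).take m.toNat).sum, j + 1) else st)
      ((W.take m.toNat).sum, 0)
    PySem.List.slice zs (some (st.2 : Int)) (some ((st.2 : Int) + m))

theorem pvS0_nonneg (a : List Int) (m' : Nat) : 0 ≤ ((pvWl a).take m').sum := by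
  apply List.sum_nonneg
  intro x hx
  exact pvWl_nonneg a x (List.mem_of_mem_take hx)

-- port A reduced to the reference form (outside the m < 0 quirk region)
theorem pv_A_eq (a : List Int) (m : Int) (hnd : ¬ D_flip_zeros_to_maximize_ones a m) :
    flip_zeros_to_maximize_ones a m = pvRef a m := by
  simp only [flip_zeros_to_maximize_ones, pvRef]
  rw [pvZA_eq]
  by_cases h1 : (((pvZs a).map (fun (i : Nat) => (i : Int))).length : Int) ≤ m
  · rw [if_pos h1, if_pos (by simpa using h1)]
  · rw [if_neg h1, if_neg (by simpa using h1)]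
    simp only [List.length_map] at h1
    simp only [List.length_map]
    by_cases h2 : m < 0
    · -- outside D_ there are at most -m zeros, so A slices to the empty list
      have hz : ((pvZs a).length : Int) ≤ -m := by
        unfold D_flip_zeros_to_maximize_ones at hnd
        push_neg at hnd
        rw [pvZs_len]
        exact hnd h2
      have hm0 : m.toNat = 0 := by omega
      rw [if_pos h2, hm0, pv_stay]
      have hk : m = -(((-m).toNat : Nat) : Int) := by omega
      simp only [Nat.cast_zero, zero_add]
      rw [PySem.List.slice_zero_start, hk, PySem.List.slice_to_neg_natCast _ _ (by omega)]
      have : ((pvZs a).map (fun (i : Nat) => (i : Int))).length - (-m).toNat = 0 := by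
        simp only [List.length_map]; omega
      rw [this, List.take_zero]
    · rw [if_neg h2]
      have hm : m = (m.toNat : Int) := by omega
      have hN : (((pvZs a).length : Int) - m + 1).toNat = ((pvZs a).length - m.toNat) + 1 := by
        omega
      rw [hN, List.range_succ_eq_map]
      simp only [List.foldl_cons]
      rw [pvWin_eq a m.toNat 0 (by omega)]
      simp only [List.drop_zero]
      have hfirst : ((if (0 : Int) < ((pvWl a).take m.toNat).sum
          then (((pvWl a).take m.toNat).sum, (0 : Nat)) else ((0 : Int), (0 : Nat))))
          = (((pvWl a).take m.toNat).sum, (0 : Nat)) := by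
        by_cases hpos : (0 : Int) < ((pvWl a).take m.toNat).sum
        · rw [if_pos hpos]
        · rw [if_neg hpos]
          have := pvS0_nonneg a m.toNat
          have h0 : ((pvWl a).take m.toNat).sum = 0 := by omega
          rw [h0]
      rw [hfirst, List.foldl_map]
      rw [PySem.List.foldl_congr_mem _ _ (fun (st : Int × Nat) j =>
          if st.1 < (((pvWl a).drop (j + 1)).take m.toNat).sum
          then ((((pvWl a).drop (j + 1)).take m.toNat).sum, j + 1) else st) _ ?_]
      intro st j hjm
      have hj : j < (pvZs a).length - m.toNat := List.mem_range.1 hjm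
      simp only [Nat.succ_eq_add_one]
      rw [pvWin_eq a m.toNat (j + 1) (by omega)]

-- port B reduced to the reference form (everywhere)
theorem pv_B_eq (a : List Int) (m : Int) :
    flip_zeros_to_maximize_ones_alt a m = pvRef a m := by
  simp only [flip_zeros_to_maximize_ones_alt, pvRef]
  rw [pvBreaks_eq, pv_st0]
  dsimp only
  by_cases h1 : (((pvZs a).map (fun (i : Nat) => (i : Int))).length : Int) ≤ m
  · rw [if_pos h1, if_pos (show (((pvZs a).length : Nat) : Int) ≤ m by simpa using h1)]
  · rw [if_neg h1, if_neg (show ¬ (((pvZs a).length : Nat) : Int) ≤ m by simpa using h1)]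
    simp only [List.length_map] at h1
    simp only [List.length_map]
    by_cases h2 : m < 0
    · rw [if_pos h2, if_pos h2]
    · rw [if_neg h2, if_neg h2]
      have hm : m = (m.toNat : Int) := by omega
      rw [PySem.List.slice_to _ (by omega)]
      have hNB : (((pvZs a).length : Int) - m).toNat = (pvZs a).length - m.toNat := by omega
      rw [hNB]
      rw [PySem.List.foldl_congr_mem _ _ (fun (st : Int × Int × Int) (j : Nat) =>
          let cur := st.1 + (pvWl a).getD (j + m.toNat) 0 - (pvWl a).getD j 0
          if st.2.1 < cur then (cur, cur, (j : Int) + 1) else (cur, st.2.1, st.2.2)) _ ?_]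
      · rw [pv_loop (pvWl a) m.toNat ((pvZs a).length - m.toNat)
            (by rw [pvWl_len]; omega)]
      · intro st j hjm
        have e1 : ((j : Int) + 1 + m - 1) = ((j + m.toNat : Nat) : Int) := by
          push_cast; omega
        have e2 : ((j : Int) + 1 - 1) = ((j : Nat) : Int) := by push_cast; ring
        simp only [e1, e2, PySem.List.pyGetD_natCast]

theorem pv_main (a : List Int) (m : Int) (hnd : ¬ D_flip_zeros_to_maximize_ones a m) :
    flip_zeros_to_maximize_ones a m = flip_zeros_to_maximize_ones_alt a m :=
  (pv_A_eq a m hnd).trans (pv_B_eq a m).symm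

-- ===== VERDICT (by name: the statement is the Claim_ definition above) =====
theorem flip_zeros_to_maximize_ones_spec : Claim_unchanged_flip_zeros_to_maximize_ones := by
  intro a m _
  unfold Spec_flip_zeros_to_maximize_ones
  intro hnd
  exact pv_main a m hnd

theorem flip_zeros_to_maximize_ones_changed : Claim_changed_flip_zeros_to_maximize_ones := by
  unfold Claim_changed_flip_zeros_to_maximize_ones; decide

theorem flip_zeros_to_maximize_ones_tight : Claim_exact_flip_zeros_to_maximize_ones := by
  intro a m _ hD
  obtain ⟨hm2, hcnt⟩ := hD
  have hzv : (-m : Int) < ((pvZs a).length : Int) := by rw [pvZs_len]; exact_mod_cast hcnt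
  have hB : flip_zeros_to_maximize_ones_alt a m = [] := by
    rw [pv_B_eq]
    simp only [pvRef]
    rw [if_neg (by omega), if_pos hm2]
  rw [hB]
  simp only [flip_zeros_to_maximize_ones]
  rw [pvZA_eq]
  rw [if_neg (by simp only [List.length_map]; omega)]
  have hm0 : m.toNat = 0 := by omega
  rw [hm0, pv_stay]
  have hk : m = -(((-m).toNat : Nat) : Int) := by omega
  simp only [Nat.cast_zero, zero_add]
  rw [PySem.List.slice_zero_start, hk, PySem.List.slice_to_neg_natCast _ _ (by omega)]
  apply List.ne_nil_of_length_pos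
  rw [List.length_take, List.length_map]
  omega
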